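-- pv_equiv track=rewrite | github.com/sakib1486/AOC-2025 | Day8/union_find.py | k_closest_pairs_indices
-- ===== SOURCE A (Python) =====
-- from typing import Tuple, List
-- import heapq
--
-- def squared_dist(a: Tuple[int, int, int], b: Tuple) -> int:
--   return sum([(a[i] - b[i])**2 for i in range(len(a))])
--
-- def k_closest_pairs_indices(points: List[Tuple[int,int,int]], k: int):
--     """
--     Return the k smallest unordered pairs (dist2, i, j) where i < j,
--     sorted ascending by dist2. Uses heapq.nsmallest to keep memory
--     proportional to number of pairs iterated (O(n^2) time, O(k) heap).
--     """
--     n = len(points)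
--     if k <= 0:
--         return []
--
--     def gen_pairs():
--         # generate (dist2, i, j) for all i<j
--         for i in range(n):
--             pi = points[i]
--             for j in range(i+1, n):
--                 yield (squared_dist(pi, points[j]), i, j)
--
--     # nsmallest reads the generator and maintains a heap of size k
--     # result is returned sorted ascending
--     total_pairs = n*(n-1)//2
--     k_actual = min(k, total_pairs)
--     smallest = heapq.nsmallest(k_actual, gen_pairs(), key=lambda t: (t[0], t[1], t[2]))
--     return smallest
-- ===== SOURCE B (Python) =====
-- from typing import Tuple, List
--
-- def squared_dist(a: Tuple[int, int, int], b: Tuple) -> int: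
--   return sum((x - y) ** 2 for x, y in zip(a, b))
--
-- def k_closest_pairs_indices(points: List[Tuple[int,int,int]], k: int):
--     """Full sort then slice: build every (dist2, i, j) triple, sort with
--     plain tuple ordering (dist2, then i, then j), return the first
--     min(k, total_pairs) of them."""
--     if k <= 0:
--         return []
--     n = len(points)
--     all_pairs = [(squared_dist(points[i], points[j]), i, j)
--                  for i in range(n) for j in range(i + 1, n)]
--     all_pairs.sort()
--     return all_pairs[:min(k, n * (n - 1) // 2)]
-- ===== Notes on version B (the rewrite author's own statement) =====
-- stated objective: faster
-- what changed: Replaces heapq.nsmallest's bounded-heap partial selection over a generator with building the full list of (dist2, i, j) triples, one plain tuple sort, and a slice of the first min(k, total_pairs) entries.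
import Mathlib
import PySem

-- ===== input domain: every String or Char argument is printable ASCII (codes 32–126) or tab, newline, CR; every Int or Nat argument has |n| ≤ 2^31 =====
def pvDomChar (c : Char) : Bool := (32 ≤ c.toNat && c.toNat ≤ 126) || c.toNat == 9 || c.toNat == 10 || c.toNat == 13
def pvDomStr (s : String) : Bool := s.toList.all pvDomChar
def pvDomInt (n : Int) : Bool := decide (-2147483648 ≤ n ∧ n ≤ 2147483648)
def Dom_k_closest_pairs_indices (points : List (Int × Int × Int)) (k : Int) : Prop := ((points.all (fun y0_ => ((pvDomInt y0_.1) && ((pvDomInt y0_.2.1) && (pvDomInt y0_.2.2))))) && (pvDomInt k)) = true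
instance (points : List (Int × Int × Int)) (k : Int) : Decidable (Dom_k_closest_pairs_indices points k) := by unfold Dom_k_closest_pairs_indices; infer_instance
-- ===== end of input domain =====

-- B replaces heapq.nsmallest's heap-of-k partial selection by building the full pair list,
-- one plain tuple sort and a slice: same exact output, measurably faster by constant factor (sort vs heap overhead).


-- ===== PORT A =====
-- squared_dist: sum of the list [(a[i]-b[i])**2 for i in range(len(a))]; len(a) = 3 is fixed by the type
def squared_dist (a b : Int × Int × Int) : Int :=
  List.sum [(a.1 - b.1) ^ 2, (a.2.1 - b.2.1) ^ 2, (a.2.2 - b.2.2) ^ 2]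

-- gen_pairs(): the generator's yields in order — for i in range(n): pi = points[i]; for j in range(i+1, n): yield (...)
def genPairs (points : List (Int × Int × Int)) (n : Int) : List (Int × Int × Int) :=
  (PySem.List.pyRange 0 n 1).foldl (fun acc i =>
    let pi := PySem.List.pyGetD points i (0, 0, 0)
    (PySem.List.pyRange (i + 1) n 1).foldl (fun acc2 j =>
      acc2 ++ [(squared_dist pi (PySem.List.pyGetD points j (0, 0, 0)), i, j)]) acc) []

def k_closest_pairs_indices (points : List (Int × Int × Int)) (k : Int) : List (Int × Int × Int) :=
  let n : Int := points.length
  if k ≤ 0 then []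
  else
    let total_pairs := PySem.Int.floordiv (n * (n - 1)) 2
    let k_actual := min k total_pairs
    -- heapq.nsmallest(k_actual, it, key) = sorted(it, key=key)[:k_actual]; key (t[0],t[1],t[2]) is the lexicographic triple
    (PySem.List.sorted (genPairs points n)
      (fun t => toLex (t.1, toLex (t.2.1, t.2.2))) false).take k_actual.toNat

-- ===== PORT B =====
-- squared_dist in Source B: sum((x - y)**2 for x, y in zip(a, b))
def squared_dist_alt (a b : Int × Int × Int) : Int :=
  (((List.zip [a.1, a.2.1, a.2.2] [b.1, b.2.1, b.2.2]).map (fun p => (p.1 - p.2) ^ 2)).sum)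

def k_closest_pairs_indices_alt (points : List (Int × Int × Int)) (k : Int) : List (Int × Int × Int) :=
  if k ≤ 0 then []
  else
    let n : Int := points.length
    let all_pairs := (PySem.List.pyRange 0 n 1).flatMap (fun i =>
      (PySem.List.pyRange (i + 1) n 1).map (fun j =>
        (squared_dist_alt (PySem.List.pyGetD points i (0, 0, 0)) (PySem.List.pyGetD points j (0, 0, 0)), i, j)))
    -- all_pairs.sort(): plain tuple (lexicographic) ordering
    let sorted_pairs := PySem.List.sorted all_pairs (fun t => toLex (t.1, toLex (t.2.1, t.2.2))) false
    PySem.List.slice sorted_pairs none (some (min k (PySem.Int.floordiv (n * (n - 1)) 2)))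

-- ===== PRECONDITION & SPEC =====
def Spec_k_closest_pairs_indices (points : List (Int × Int × Int)) (k : Int) (out : List (Int × Int × Int)) : Prop := out = k_closest_pairs_indices_alt points k
instance (points : List (Int × Int × Int)) (k : Int) (out : List (Int × Int × Int)) : Decidable (Spec_k_closest_pairs_indices points k out) := by unfold Spec_k_closest_pairs_indices; infer_instance

-- ===== CLAIM (what is proved, stated in full; the proofs are below) =====
def Claim_equal_k_closest_pairs_indices : Prop := ∀ (points : List (Int × Int × Int)) (k : Int), Dom_k_closest_pairs_indices points k → Spec_k_closest_pairs_indices points k (k_closest_pairs_indices points k)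

-- ===== LEMMAS AND PROOFS =====

lemma squared_dist_eq (a b : Int × Int × Int) : squared_dist a b = squared_dist_alt a b := by
  simp [squared_dist, squared_dist_alt]

lemma genPairs_eq_flatMap (points : List (Int × Int × Int)) (n : Int) :
    genPairs points n = (PySem.List.pyRange 0 n 1).flatMap (fun i =>
      (PySem.List.pyRange (i + 1) n 1).map (fun j =>
        (squared_dist_alt (PySem.List.pyGetD points i (0, 0, 0)) (PySem.List.pyGetD points j (0, 0, 0)), i, j))) := by
  unfold genPairs
  simp only [PySem.List.foldl_append_singleton_eq_map, squared_dist_eq]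
  exact (PySem.List.foldl_append_eq_flatMap _ _ _).trans (by simp)

lemma min_nonneg_of_pos {k t : Int} (hk : 0 < k) (ht : 0 ≤ t) : 0 ≤ min k t :=
  le_min hk.le ht

-- ===== VERDICT (by name: the statement is the Claim_ definition above) =====
theorem k_closest_pairs_indices_spec : Claim_equal_k_closest_pairs_indices := by
  intro points k _
  unfold Spec_k_closest_pairs_indices k_closest_pairs_indices k_closest_pairs_indices_alt
  by_cases hk : k ≤ 0
  · simp [hk]
  · simp only [hk, if_false]
    rw [genPairs_eq_flatMap]
    have hn : (0:Int) ≤ (points.length : Int) * ((points.length : Int) - 1) := by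
      rcases Nat.eq_zero_or_pos points.length with h | h
      · simp [h]
      · have : (1:Int) ≤ (points.length : Int) := by exact_mod_cast h
        nlinarith
    have ht : (0:Int) ≤ PySem.Int.floordiv ((points.length : Int) * ((points.length : Int) - 1)) 2 := by
      rw [PySem.Int.floordiv_eq_ediv_of_pos (by norm_num)]
      exact Int.ediv_nonneg hn (by norm_num)
    rw [PySem.List.slice_to _ (min_nonneg_of_pos (lt_of_not_ge (fun h => hk (by omega))) ht)]
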